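-- pv_equiv track=rewrite | github.com/kamiderka/WDI-2024 | Zestaw 1 - Proste programy z pętlami/zad035.py | ends_with_unique_digit
-- ===== SOURCE A (Python) =====
-- def ends_with_unique_digit(n :int)->bool:
--     assert n >=0
--
--     last_digit = n%10
--     n//=10
--     while n>0:
--         if n%10==last_digit:
--             return False
--         n//=10
--
--     return True
-- ===== SOURCE B (Python) =====
-- def ends_with_unique_digit(n: int) -> bool:
--     assert n >= 0
--     s = str(n)
--     return s[-1] not in s[:-1]
-- ===== Notes on version B (the rewrite author's own statement) =====
-- stated objective: idiomatic
-- what changed: Replaces the arithmetic digit-extraction while-loop (repeated modulus and floor-division with a per-digit comparison) by converting n to its decimal string once and doing a single membership test of the last character against the preceding prefix.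
import Mathlib
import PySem

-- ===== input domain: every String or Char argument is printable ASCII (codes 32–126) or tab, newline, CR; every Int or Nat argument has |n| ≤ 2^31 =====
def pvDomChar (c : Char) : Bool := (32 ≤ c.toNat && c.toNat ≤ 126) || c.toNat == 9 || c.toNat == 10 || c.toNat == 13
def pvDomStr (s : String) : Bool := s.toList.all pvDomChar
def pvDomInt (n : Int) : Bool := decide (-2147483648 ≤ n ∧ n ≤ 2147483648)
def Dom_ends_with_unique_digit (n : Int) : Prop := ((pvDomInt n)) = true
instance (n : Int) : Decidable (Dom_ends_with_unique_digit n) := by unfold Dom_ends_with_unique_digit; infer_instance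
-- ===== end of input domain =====

-- B replaces A's arithmetic digit-extraction loop by one decimal-string conversion
-- and a single membership test of the last character in the preceding prefix (idiomatic).


-- ===== PORT A =====
-- the `while n>0:` loop of A
def ewudLoop (last_digit : Int) (n : Int) : Bool :=
  if _h : 0 < n then
    if PySem.Int.mod n 10 = last_digit then false
    else ewudLoop last_digit (PySem.Int.floordiv n 10)
  else true
termination_by n.toNat
decreasing_by
  have h10 : PySem.Int.floordiv n 10 = n / 10 := PySem.Int.floordiv_eq_ediv_of_pos (by omega)
  omega

def ends_with_unique_digit (n : Int) : Bool :=
  let last_digit := PySem.Int.mod n 10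
  ewudLoop last_digit (PySem.Int.floordiv n 10)

-- ===== PORT B =====
def ends_with_unique_digit_alt (n : Int) : Bool :=
  let s := PySem.Int.toStr n
  match PySem.Str.pyGet? s (-1) with
  | some c => !(PySem.Str.isIn (String.ofList [c]) (PySem.Str.slice s none (some (-1))))
  | none => false  -- unreachable: str(n) is never empty, so s[-1] cannot raise

-- ===== PRECONDITION & SPEC =====
-- A's `assert n >= 0` raises AssertionError on negative n
def Pre_ends_with_unique_digit (n : Int) : Prop := 0 ≤ n
instance (n : Int) : Decidable (Pre_ends_with_unique_digit n) := by unfold Pre_ends_with_unique_digit; infer_instance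
def pvWitness_ends_with_unique_digit : Int := (7)
def Spec_ends_with_unique_digit (n : Int) (out : Bool) : Prop := out = ends_with_unique_digit_alt n
instance (n : Int) (out : Bool) : Decidable (Spec_ends_with_unique_digit n out) := by unfold Spec_ends_with_unique_digit; infer_instance

-- ===== CLAIM (what is proved, stated in full; the proofs are below) =====
def Claim_equal_ends_with_unique_digit : Prop := ∀ (n : Int), Dom_ends_with_unique_digit n → Pre_ends_with_unique_digit n → Spec_ends_with_unique_digit n (ends_with_unique_digit n)

-- ===== LEMMAS AND PROOFS =====

-- A's loop, on naturals
def natLoop (last : Nat) (m : Nat) : Bool :=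
  if h : m = 0 then true
  else if m % 10 = last then false
  else natLoop last (m / 10)
termination_by m
decreasing_by exact Nat.div_lt_self (Nat.pos_of_ne_zero h) (by omega)

lemma ewudLoop_eq_natLoop (last m : Nat) : ewudLoop (last : Int) (m : Int) = natLoop last m := by
  induction m using Nat.strong_induction_on with
  | _ m ih =>
    rw [ewudLoop, natLoop]
    by_cases h : m = 0
    · simp [h]
    · have hm : (0:Int) < (m:Int) := by omega
      have hmod : PySem.Int.mod (m:Int) 10 = ((m % 10 : Nat) : Int) := by
        rw [PySem.Int.mod_eq_emod_of_pos (by omega)]; omega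
      have hdiv : PySem.Int.floordiv (m:Int) 10 = ((m / 10 : Nat) : Int) := by
        rw [PySem.Int.floordiv_eq_ediv_of_pos (by omega)]; omega
      simp only [hm, dif_pos, h, hmod, hdiv]
      by_cases he : m % 10 = last
      · simp [he]
      · have : ¬ ((m % 10 : Nat) : Int) = (last : Int) := by omega
        simp only [this, he, if_neg, not_false_iff]
        exact ih (m / 10) (Nat.div_lt_self (Nat.pos_of_ne_zero h) (by omega))

lemma tdc_acc (b f : Nat) : ∀ (n : Nat) (ds : List Char),
    Nat.toDigitsCore b f n ds = Nat.toDigitsCore b f n [] ++ ds := by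
  induction f with
  | zero => intro n ds; simp [Nat.toDigitsCore]
  | succ f ih =>
    intro n ds
    simp only [Nat.toDigitsCore]
    by_cases h : n / b = 0
    · simp [h]
    · simp only [h, if_neg, not_false_iff]
      rw [ih (n / b) ((n % b).digitChar :: ds), ih (n / b) [(n % b).digitChar]]
      simp

lemma tdc_fuel : ∀ (n f f' : Nat), n < f → n < f' →
    Nat.toDigitsCore 10 f n [] = Nat.toDigitsCore 10 f' n [] := by
  intro n
  induction n using Nat.strong_induction_on with
  | _ n ih =>
    intro f f' hf hf'
    obtain ⟨f1, rfl⟩ : ∃ g, f = g + 1 := ⟨f - 1, by omega⟩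
    obtain ⟨f2, rfl⟩ : ∃ g, f' = g + 1 := ⟨f' - 1, by omega⟩
    simp only [Nat.toDigitsCore]
    by_cases h : n / 10 = 0
    · simp [h]
    · simp only [h, if_neg, not_false_iff]
      have hlt : n / 10 < n := Nat.div_lt_self (by omega) (by omega)
      rw [tdc_acc 10 f1, tdc_acc 10 f2,
        ih (n / 10) hlt f1 f2 (by omega) (by omega)]

lemma toDigits_lt {m : Nat} (h : m < 10) : Nat.toDigits 10 m = [Nat.digitChar m] := by
  simp [Nat.toDigits, Nat.toDigitsCore, Nat.div_eq_of_lt h, Nat.mod_eq_of_lt h]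

lemma toDigits_ge {m : Nat} (h : 10 ≤ m) :
    Nat.toDigits 10 m = Nat.toDigits 10 (m / 10) ++ [Nat.digitChar (m % 10)] := by
  have h0 : m / 10 ≠ 0 := by omega
  rw [Nat.toDigits, Nat.toDigits]
  show Nat.toDigitsCore 10 (m + 1) m [] = _
  rw [Nat.toDigitsCore]
  simp only [h0, if_neg, not_false_iff]
  rw [tdc_acc, tdc_fuel (m / 10) m (m / 10 + 1) (Nat.div_lt_self (by omega) (by omega)) (by omega)]

lemma digitChar_inj {a b : Nat} (ha : a < 10) (hb : b < 10) :
    Nat.digitChar a = Nat.digitChar b ↔ a = b := by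
  interval_cases a <;> interval_cases b <;> simp [Nat.digitChar]

lemma natLoop_eq_mem (last : Nat) (hl : last < 10) : ∀ k, 0 < k →
    natLoop last k = !decide (Nat.digitChar last ∈ Nat.toDigits 10 k) := by
  intro k
  induction k using Nat.strong_induction_on with
  | _ k ih =>
    intro hk
    rw [natLoop]
    by_cases hsm : k < 10
    · have hk0 : k / 10 = 0 := by omega
      rw [toDigits_lt hsm]
      by_cases he : k % 10 = last
      · have : last = k := by omega
        simp [he, this, hk.ne']
      · have hne : Nat.digitChar last ≠ Nat.digitChar k := by
          rw [ne_eq, digitChar_inj hl hsm]; omega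
        simp [hk.ne', he, hk0, natLoop, hne]
    · rw [toDigits_ge (by omega)]
      have hd : k / 10 > 0 := by omega
      by_cases he : k % 10 = last
      · simp [hk.ne', he]
      · have hne : Nat.digitChar last ≠ Nat.digitChar (k % 10) := by
          rw [ne_eq, digitChar_inj hl (by omega)]; omega
        rw [ih (k / 10) (Nat.div_lt_self (by omega) (by omega)) hd]
        simp [hk.ne', he, hne]

lemma toDigits_getLast? (m : Nat) :
    (Nat.toDigits 10 m).getLast? = some (Nat.digitChar (m % 10)) := by
  by_cases h : m < 10
  · rw [toDigits_lt h, Nat.mod_eq_of_lt h]; rfl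
  · rw [toDigits_ge (by omega)]; simp

lemma toDigits_dropLast (m : Nat) :
    (Nat.toDigits 10 m).dropLast =
      if m < 10 then [] else Nat.toDigits 10 (m / 10) := by
  by_cases h : m < 10
  · rw [toDigits_lt h]; simp [h]
  · rw [toDigits_ge (by omega)]; simp [h]

lemma pyGet?_neg_one (xs : List Char) : PySem.List.pyGet? xs (-1) = xs.getLast? := by
  simp only [PySem.List.pyGet?, PySem.List.pyIdx?]
  cases xs with
  | nil => rfl
  | cons a t => simp [List.getLast?_eq_getElem?]

-- ===== VERDICT (by name: the statement is the Claim_ definition above) =====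
theorem ends_with_unique_digit_spec : Claim_equal_ends_with_unique_digit := by
  intro n _ hpre
  have h0 : (0:Int) ≤ n := hpre
  unfold Spec_ends_with_unique_digit ends_with_unique_digit ends_with_unique_digit_alt
  set m := n.toNat with hm
  have hn : n = (m : Int) := by omega
  -- the string side
  have hchars : (PySem.Int.toStr n).toList = Nat.toDigits 10 m := by
    rw [PySem.Int.toList_toStr, PySem.Int.toChars]
    simp only [hn]
    rw [if_neg (by omega)]
    congr 1
  have hget : PySem.Str.pyGet? (PySem.Int.toStr n) (-1)
      = some (Nat.digitChar (m % 10)) := by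
    rw [PySem.Str.pyGet?, PySem.Chars.pyGet?, hchars, pyGet?_neg_one, toDigits_getLast?]
  show ewudLoop (PySem.Int.mod n 10) (PySem.Int.floordiv n 10)
      = (match PySem.Str.pyGet? (PySem.Int.toStr n) (-1) with
         | some c => !(PySem.Str.isIn (String.ofList [c])
             (PySem.Str.slice (PySem.Int.toStr n) none (some (-1))))
         | none => false)
  rw [hget]
  -- A side
  have hmod : PySem.Int.mod n 10 = ((m % 10 : Nat) : Int) := by
    rw [PySem.Int.mod_eq_emod_of_pos (by omega)]; omega
  have hdiv : PySem.Int.floordiv n 10 = ((m / 10 : Nat) : Int) := by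
    rw [PySem.Int.floordiv_eq_ediv_of_pos (by omega)]; omega
  simp only [hmod, hdiv, ewudLoop_eq_natLoop]
  -- B's membership
  have hofl : (String.ofList [Nat.digitChar (m % 10)]).toList = [Nat.digitChar (m % 10)] := by
    simp
  have hiff := PySem.Str.isIn_iff_infix (String.ofList [Nat.digitChar (m % 10)])
      (PySem.Str.slice (PySem.Int.toStr n) none (some (-1)))
  rw [PySem.Str.slice_to_neg_one, hchars, hofl, List.singleton_infix_iff] at hiff
  have hmem : PySem.Str.isIn (String.ofList [Nat.digitChar (m % 10)])
        (PySem.Str.slice (PySem.Int.toStr n) none (some (-1)))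
      = decide (Nat.digitChar (m % 10) ∈ (Nat.toDigits 10 m).dropLast) := by
    cases hB : PySem.Str.isIn (String.ofList [Nat.digitChar (m % 10)])
        (PySem.Str.slice (PySem.Int.toStr n) none (some (-1))) with
    | false =>
      symm; rw [decide_eq_false_iff_not]
      intro hm'
      rw [hB] at hiff
      exact absurd (hiff.mpr hm') (by simp)
    | true =>
      symm; rw [decide_eq_true_iff]
      rw [hB] at hiff
      exact hiff.mp rfl
  rw [hmem, toDigits_dropLast]
  by_cases h : m < 10
  · have : m / 10 = 0 := by omega
    simp [h, this, natLoop]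
  · rw [if_neg h, natLoop_eq_mem (m % 10) (by omega) (m / 10) (by omega)]
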